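-- pv_equiv track=rewrite | github.com/chowell2000/hash-tables | applications/sumdiff/sumdiff.py | symdif
-- ===== SOURCE A (Python) =====
-- def f(x):
--     return x * 4 + 6
--
-- def symdif(q):
--     sums = dict()
--     diffs = dict()
--     symmdiffs = dict()
--     for x in q:
--         for y in q:
--             sums[(x,y)] = f(x) + f(y)
--             diffs[(x,y)] = f(x) - f(y)
--
--
--     for i in sums.keys():
--         for j in diffs.keys():
--             if sums[i] == diffs[j]:
--                 symmdiffs[i,j] = sums[i]
--
--     return symmdiffs
-- ===== SOURCE B (Python) =====
-- def f(x):
--     return x * 4 + 6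
--
-- def symdif(q):
--     by_diff = {}
--     for a in q:
--         for b in q:
--             by_diff.setdefault(f(a) - f(b), []).append((a, b))
--     symmdiffs = {}
--     for x in q:
--         for y in q:
--             s = f(x) + f(y)
--             for j in by_diff.get(s, []):
--                 symmdiffs[(x, y), j] = s
--     return symmdiffs
-- ===== Notes on version B (the rewrite author's own statement) =====
-- stated objective: faster
-- what changed: Instead of filling sums and diffs dicts over all pairs and then comparing every sum key with every diff key in a quadratic-over-pairs double scan, B groups the difference pairs into a dict keyed by their value and, for each sum pair, looks up exactly the matching difference pairs.
import Mathlib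
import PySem

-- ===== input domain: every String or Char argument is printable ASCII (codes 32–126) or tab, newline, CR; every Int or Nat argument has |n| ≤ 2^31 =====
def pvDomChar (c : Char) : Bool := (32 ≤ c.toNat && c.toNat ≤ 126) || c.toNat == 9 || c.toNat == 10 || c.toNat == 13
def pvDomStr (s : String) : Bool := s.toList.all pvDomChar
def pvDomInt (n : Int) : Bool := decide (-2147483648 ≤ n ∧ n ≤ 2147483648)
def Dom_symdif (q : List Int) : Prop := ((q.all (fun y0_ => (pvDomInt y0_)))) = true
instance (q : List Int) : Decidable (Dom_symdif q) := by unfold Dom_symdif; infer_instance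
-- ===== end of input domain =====

-- B replaces A's all-pairs comparison of the sums dict against the diffs dict by a dict
-- indexing the difference pairs by their value, looked up once per sum pair (objective: faster).

-- ===== PORT A =====
-- helper f of the Python module
def pyf (x : Int) : Int := x * 4 + 6

-- literal port of A: both dicts are filled in one nested loop over q × q (the loop state is
-- the pair (sums, diffs)); then every sum key is compared against every diff key.
-- sums[i] / diffs[j] are read with getD _ 0: those keys are always present, so this is exact.
def symdif (q : List Int) : List ((Int × Int) × (Int × Int) × Int) :=
  let sd : PySem.Dict (Int × Int) Int × PySem.Dict (Int × Int) Int :=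
    q.foldl (fun sd x =>
      q.foldl (fun sd y =>
        (sd.1.insert (x, y) (pyf x + pyf y), sd.2.insert (x, y) (pyf x - pyf y))) sd)
      (PySem.Dict.empty, PySem.Dict.empty)
  let sums := sd.1
  let diffs := sd.2
  let symmdiffs : PySem.Dict ((Int × Int) × (Int × Int)) Int :=
    sums.keys.foldl (fun d i =>
      diffs.keys.foldl (fun d j =>
        if sums.getD i 0 = diffs.getD j 0 then d.insert (i, j) (sums.getD i 0) else d) d)
      PySem.Dict.empty
  symmdiffs.items.map (fun p => (p.1.1, p.1.2, p.2))

-- ===== PORT B =====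
-- literal port of Source B: by_diff.setdefault(k, []).append(p) is Dict.modify k [] (· ++ [p]);
-- by_diff.get(s, []) is Dict.getD s [].
def symdif_alt (q : List Int) : List ((Int × Int) × (Int × Int) × Int) :=
  let byDiff : PySem.Dict Int (List (Int × Int)) :=
    q.foldl (fun d a =>
      q.foldl (fun d b => d.modify (pyf a - pyf b) [] (· ++ [(a, b)])) d) PySem.Dict.empty
  let out : PySem.Dict ((Int × Int) × (Int × Int)) Int :=
    q.foldl (fun d x =>
      q.foldl (fun d y =>
        let s := pyf x + pyf y
        (byDiff.getD s []).foldl (fun d j => d.insert ((x, y), j) s) d) d) PySem.Dict.empty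
  out.items.map (fun p => (p.1.1, p.1.2, p.2))

-- ===== PRECONDITION & SPEC =====
def Spec_symdif (q : List Int) (out : List ((Int × Int) × (Int × Int) × Int)) : Prop := out = symdif_alt q
instance (q : List Int) (out : List ((Int × Int) × (Int × Int) × Int)) : Decidable (Spec_symdif q out) := by unfold Spec_symdif; infer_instance

-- ===== CLAIM (what is proved, stated in full; the proofs are below) =====
def Claim_equal_symdif : Prop := ∀ (q : List Int), Dom_symdif q → Spec_symdif q (symdif q)

-- ===== LEMMAS AND PROOFS =====

-- the list of all pairs of q (with duplicates), its ordered dedup, and the two value functions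
def pvPairs (q : List Int) : List (Int × Int) := q.flatMap (fun x => q.map (fun y => (x, y)))
def pvG (p : Int × Int) : Int := pyf p.1 + pyf p.2
def pvH (p : Int × Int) : Int := pyf p.1 - pyf p.2
def pvU (q : List Int) : PySem.Set (Int × Int) := PySem.Set.ofList (pvPairs q)
def pvKeys (q : List Int) : List ((Int × Int) × (Int × Int)) :=
  (pvU q).flatMap (fun i => ((pvU q).filter (fun j => pvH j == pvG i)).map (fun j => (i, j)))

-- a nested loop over x ∈ X, y ∈ V x is a fold over the flattened tagged pair list
theorem pv_foldl_flatMap_map {α β γ σ : Type} (X : List α) (V : α → List β) (emb : α → β → γ)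
    (step : σ → γ → σ) (init : σ) :
    (X.flatMap (fun x => (V x).map (emb x))).foldl step init
      = X.foldl (fun a x => (V x).foldl (fun a y => step a (emb x y)) a) init := by
  rw [List.foldl_flatMap]; simp only [List.foldl_map]

theorem pv_foldl_ite_filter {α β : Type} (p : α → Prop) [DecidablePred p] (f : β → α → β)
    (l : List α) (init : β) :
    l.foldl (fun a x => if p x then f a x else a) init
      = (l.filter (fun x => decide (p x))).foldl f init := by
  rw [List.foldl_filter]; simp only [decide_eq_true_eq]

-- a dict built by inserting a value that is a function of the key
theorem pv_getD_foldl_insert_fun {κ ν : Type} [BEq κ] [LawfulBEq κ] [DecidableEq κ]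
    (g : κ → ν) (v0 : ν) (L : List κ) (d : PySem.Dict κ ν) (k : κ) :
    (L.foldl (fun d x => d.insert x (g x)) d).getD k v0
      = if k ∈ L then g k else d.getD k v0 := by
  induction L generalizing d with
  | nil => simp
  | cons x L ih =>
      simp only [List.foldl_cons, ih, List.mem_cons, PySem.Dict.getD_insert]
      by_cases hk : k ∈ L <;> by_cases hx : k = x <;> simp [hk, hx]

theorem pv_keys_foldl_insert_fun {κ ν : Type} [BEq κ] [LawfulBEq κ]
    (g : κ → ν) (L : List κ) :
    (L.foldl (fun d x => d.insert x (g x)) (PySem.Dict.empty : PySem.Dict κ ν)).keys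
      = PySem.Set.ofList L := by
  have h := PySem.Dict.keys_foldl_insert L (fun _ x => g x) (PySem.Dict.empty : PySem.Dict κ ν)
  simpa [PySem.Dict.keys_empty, PySem.Set.update_nil_left] using h

theorem pv_items_foldl_insert_fun {κ ν : Type} [BEq κ] [LawfulBEq κ] [DecidableEq κ]
    (g : κ → ν) (v0 : ν) (L : List κ) :
    (L.foldl (fun d x => d.insert x (g x)) (PySem.Dict.empty : PySem.Dict κ ν)).items
      = (PySem.Set.ofList L).map (fun k => (k, g k)) := by
  have hnd : (L.foldl (fun d x => d.insert x (g x)) (PySem.Dict.empty : PySem.Dict κ ν)).keys.Nodup :=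
    PySem.Dict.nodup_keys_foldl_insert L (fun _ x => g x) _ PySem.Dict.nodup_keys_empty
  rw [PySem.Dict.items_eq_map_keys _ hnd v0, pv_keys_foldl_insert_fun]
  refine List.map_congr_left (fun k hk => ?_)
  have hkL : k ∈ L := (PySem.Set.mem_ofList _ _).1 hk
  rw [pv_getD_foldl_insert_fun, if_pos hkL]

theorem pv_filter_comm {α : Type} (p q : α → Bool) (l : List α) :
    (l.filter q).filter p = (l.filter p).filter q := by
  simp only [List.filter_filter]
  exact List.filter_congr (fun a _ => Bool.and_comm _ _)

-- Set.ofList commutes with filter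
theorem pv_ofList_filter {α : Type} [BEq α] [LawfulBEq α] (p : α → Bool) (l : List α) :
    PySem.Set.ofList (l.filter p) = (PySem.Set.ofList l).filter p := by
  induction l with
  | nil => simp [PySem.Set.ofList_nil]
  | cons x xs ih =>
      rw [PySem.Set.ofList_cons]
      by_cases hp : p x
      · rw [List.filter_cons_of_pos hp, PySem.Set.ofList_cons, ih,
          List.filter_cons_of_pos hp]
        simp only [PySem.Set.discard]
        rw [pv_filter_comm]
      · rw [List.filter_cons_of_neg (by simpa using hp), ih,
          List.filter_cons_of_neg (by simpa using hp)]
        simp only [PySem.Set.discard]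
        rw [pv_filter_comm]
        refine (List.filter_eq_self.2 (fun a ha => ?_)).symm
        have hpa : p a = true := (List.mem_filter.1 ha).2
        have hax : a ≠ x := fun h => hp (h ▸ hpa)
        simp [hax]

-- Set.ofList commutes with an injective map
theorem pv_ofList_map_inj {α β : Type} [BEq α] [LawfulBEq α] [BEq β] [LawfulBEq β]
    (f : α → β) (hf : Function.Injective f) (l : List α) :
    PySem.Set.ofList (l.map f) = (PySem.Set.ofList l).map f := by
  induction l with
  | nil => simp [PySem.Set.ofList_nil]
  | cons x xs ih =>
      rw [List.map_cons, PySem.Set.ofList_cons, PySem.Set.ofList_cons, ih]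
      simp only [PySem.Set.discard, List.map_cons, List.cons.injEq, true_and]
      rw [List.filter_map]
      congr 1
      refine List.filter_congr (fun a _ => ?_)
      simp only [Function.comp_apply]
      by_cases h : a = x
      · simp [h]
      · have hfx : (f a == f x) = false := by
          rw [Bool.eq_false_iff]
          intro hc
          exact h (hf (by simpa using hc))
        simp [h, hfx]

theorem pv_flatMap_ite_nil {α β : Type} [BEq α] [LawfulBEq α] [DecidableEq α]
    (l : List α) (G : α → List β) (x : α) :
    (l.flatMap (fun a => if a = x then [] else G a))
      = (l.filter (fun a => !(a == x))).flatMap G := by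
  induction l with
  | nil => simp
  | cons a l ih =>
      by_cases h : a = x
      · simp [h, ih]
      · simp [h, ih]

theorem pv_filter_flatMap {α β : Type} (l : List α) (f : α → List β) (p : β → Bool) :
    (l.flatMap f).filter p = l.flatMap (fun a => (f a).filter p) := by
  induction l with
  | nil => simp
  | cons a l ih => simp [List.flatMap_cons, List.filter_append, ih]

-- Set.ofList of a tagged flatMap: the dedup distributes to the outer and the inner lists
theorem pv_ofList_flatMap_pairs {α β : Type} [BEq α] [LawfulBEq α] [DecidableEq α]
    [BEq β] [LawfulBEq β] (F : α → List β) (X : List α) :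
    PySem.Set.ofList (X.flatMap (fun x => (F x).map (fun y => (x, y))))
      = (PySem.Set.ofList X).flatMap (fun x => (PySem.Set.ofList (F x)).map (fun y => (x, y))) := by
  induction X with
  | nil => simp [PySem.Set.ofList_nil]
  | cons x xs ih =>
      rw [List.flatMap_cons, PySem.Set.ofList_append, PySem.Set.update_eq_append_filter, ih,
        PySem.Set.ofList_cons, List.flatMap_cons,
        pv_ofList_map_inj (fun y => (x, y)) (fun a b h => by simpa using h) (F x)]
      congr 1
      rw [pv_filter_flatMap]
      have hinner : ∀ a, ((PySem.Set.ofList (F a)).map (fun y => (a, y))).filter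
            (fun y => !(PySem.Set.contains ((PySem.Set.ofList (F x)).map (fun y => (x, y))) y))
          = if a = x then [] else (PySem.Set.ofList (F a)).map (fun y => (a, y)) := by
        intro a
        by_cases h : a = x
        · subst h
          rw [if_pos rfl]
          refine List.filter_eq_nil_iff.2 (fun y hy => ?_)
          have hc : PySem.Set.contains ((PySem.Set.ofList (F a)).map (fun y => (a, y))) y = true :=
            (PySem.Set.contains_iff _ _).2 hy
          simp only [hc, Bool.not_true, Bool.false_eq_true, not_false_eq_true]
        · rw [if_neg h]
          refine List.filter_eq_self.2 (fun y hy => ?_)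
          obtain ⟨b, hb, rfl⟩ := List.mem_map.1 hy
          have hc : PySem.Set.contains
              ((PySem.Set.ofList (F x)).map (fun y => (x, y))) (a, b) = false := by
            rw [Bool.eq_false_iff]
            intro hc'
            obtain ⟨c, _, hc2⟩ := List.mem_map.1 ((PySem.Set.contains_iff _ _).1 hc')
            exact h (congrArg Prod.fst hc2).symm
          simp only [hc, Bool.not_false]
      simp only [hinner]
      rw [pv_flatMap_ite_nil]
      simp [PySem.Set.discard]

-- tagged flatMap over nodup lists is nodup
theorem pv_nodup_flatMap_pairs {α β : Type} (U : List α) (V : α → List β)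
    (hU : U.Nodup) (hV : ∀ x, (V x).Nodup) :
    (U.flatMap (fun x => (V x).map (fun y => (x, y)))).Nodup := by
  induction U with
  | nil => simp
  | cons x xs ih =>
      rw [List.flatMap_cons, List.nodup_append]
      refine ⟨(hV x).map (fun a b h => by simpa using h), ih (List.nodup_cons.1 hU).2, ?_⟩
      intro y hy z hz
      obtain ⟨b, hb, rfl⟩ := List.mem_map.1 hy
      obtain ⟨x', hx', hmem⟩ := List.mem_flatMap.1 hz
      obtain ⟨c, hc1, rfl⟩ := List.mem_map.1 hmem
      intro he
      have hx : x = x' := congrArg Prod.fst he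
      exact (List.nodup_cons.1 hU).1 (by rwa [hx])

theorem pv_nodup_pvKeys (q : List Int) : (pvKeys q).Nodup := by
  refine pv_nodup_flatMap_pairs _ _ (PySem.Set.nodup_ofList _) (fun i => ?_)
  exact (PySem.Set.nodup_ofList _).filter _

-- ---- shared dict abbreviations (proof-side only) ----
def pvSums (q : List Int) : PySem.Dict (Int × Int) Int :=
  (pvPairs q).foldl (fun d p => d.insert p (pvG p)) PySem.Dict.empty
def pvDiffs (q : List Int) : PySem.Dict (Int × Int) Int :=
  (pvPairs q).foldl (fun d p => d.insert p (pvH p)) PySem.Dict.empty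
def pvFlatten (p : ((Int × Int) × (Int × Int)) × Int) : (Int × Int) × (Int × Int) × Int :=
  (p.1.1, p.1.2, p.2)

theorem pv_getD_pvSums (q : List Int) (i : Int × Int) (h : i ∈ pvPairs q) :
    (pvSums q).getD i 0 = pvG i := by
  have := pv_getD_foldl_insert_fun pvG 0 (pvPairs q) PySem.Dict.empty i
  rw [pvSums, this, if_pos h]

theorem pv_getD_pvDiffs (q : List Int) (j : Int × Int) (h : j ∈ pvPairs q) :
    (pvDiffs q).getD j 0 = pvH j := by
  have := pv_getD_foldl_insert_fun pvH 0 (pvPairs q) PySem.Dict.empty j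
  rw [pvDiffs, this, if_pos h]

-- ofList of the flattened (duplicate-carrying) key list is exactly pvKeys
theorem pv_ofList_flat (q : List Int) :
    PySem.Set.ofList ((pvPairs q).flatMap (fun p =>
        ((pvPairs q).filter (fun j => pvH j == pvG p)).map (fun j => (p, j))))
      = pvKeys q := by
  have g3 : PySem.Set.ofList ((pvPairs q).flatMap (fun p =>
        ((pvPairs q).filter (fun j => pvH j == pvG p)).map (fun j => (p, j))))
      = (PySem.Set.ofList (pvPairs q)).flatMap (fun p =>
          (PySem.Set.ofList ((pvPairs q).filter (fun j => pvH j == pvG p))).map (fun j => (p, j))) :=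
    pv_ofList_flatMap_pairs _ _
  have g4 : ∀ p : Int × Int,
      PySem.Set.ofList ((pvPairs q).filter (fun j => pvH j == pvG p))
        = (pvU q).filter (fun j => pvH j == pvG p) := fun p => pv_ofList_filter _ _
  rw [g3]
  simp only [g4]
  rfl

-- ---- B-side characterisation ----
theorem pv_byDiff_getD (q : List Int) (c : Int) :
    (q.foldl (fun d a =>
        q.foldl (fun d b => d.modify (pyf a - pyf b) [] (· ++ [(a, b)])) d)
      (PySem.Dict.empty : PySem.Dict Int (List (Int × Int)))).getD c []
      = (pvPairs q).filter (fun p => pvH p == c) := by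
  have h1 : (pvPairs q).foldl (fun d p => d.modify (pvH p) [] (· ++ [p]))
        (PySem.Dict.empty : PySem.Dict Int (List (Int × Int)))
      = q.foldl (fun d a =>
          q.foldl (fun d b => d.modify (pyf a - pyf b) [] (· ++ [(a, b)])) d) PySem.Dict.empty :=
    pv_foldl_flatMap_map q (fun _ => q) (fun x y => (x, y)) _ _
  have h2 : (pvPairs q).foldl (fun d p => d.modify (pvH p) [] (· ++ [p]))
        (PySem.Dict.empty : PySem.Dict Int (List (Int × Int)))
      = ((pvPairs q).map (fun p => (pvH p, p))).foldl
          (fun d pr => d.modify pr.1 [] (· ++ [pr.2])) PySem.Dict.empty :=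
    (List.foldl_map (f := fun p => (pvH p, p))
      (g := fun (d : PySem.Dict Int (List (Int × Int))) (pr : Int × (Int × Int)) => d.modify pr.1 [] (· ++ [pr.2]))).symm
  rw [← h1, h2, PySem.Dict.getD_foldl_modify_append]
  simp [List.filter_map, List.map_map, Function.comp_def]

theorem pv_B_items (q : List Int) :
    symdif_alt q = (pvKeys q).map (fun k => (k.1, k.2, pvG k.1)) := by
  have h0 : symdif_alt q
      = (q.foldl (fun d x =>
          q.foldl (fun d y =>
            (((pvPairs q).filter (fun p => pvH p == pyf x + pyf y)).foldl
              (fun d j => d.insert ((x, y), j) (pyf x + pyf y)) d)) d)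
          (PySem.Dict.empty : PySem.Dict ((Int × Int) × (Int × Int)) Int)).items.map pvFlatten := by
    unfold symdif_alt
    simp only [pv_byDiff_getD]
    rfl
  have h1 : (pvPairs q).foldl (fun d p =>
        ((pvPairs q).filter (fun j => pvH j == pvG p)).foldl
          (fun d j => d.insert (p, j) (pvG p)) d)
        (PySem.Dict.empty : PySem.Dict ((Int × Int) × (Int × Int)) Int)
      = q.foldl (fun d x =>
          q.foldl (fun d y =>
            (((pvPairs q).filter (fun p => pvH p == pyf x + pyf y)).foldl
              (fun d j => d.insert ((x, y), j) (pyf x + pyf y)) d)) d) PySem.Dict.empty :=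
    pv_foldl_flatMap_map q (fun _ => q) (fun x y => (x, y)) _ _
  have h2 : ((pvPairs q).flatMap (fun p =>
        ((pvPairs q).filter (fun j => pvH j == pvG p)).map (fun j => (p, j)))).foldl
          (fun d k => d.insert k (pvG k.1))
          (PySem.Dict.empty : PySem.Dict ((Int × Int) × (Int × Int)) Int)
      = (pvPairs q).foldl (fun d p =>
          ((pvPairs q).filter (fun j => pvH j == pvG p)).foldl
            (fun d j => d.insert (p, j) (pvG p)) d) PySem.Dict.empty :=
    pv_foldl_flatMap_map (pvPairs q)
      (fun p => (pvPairs q).filter (fun j => pvH j == pvG p)) (fun p j => (p, j))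
      (fun (d : PySem.Dict ((Int × Int) × (Int × Int)) Int) (k : (Int × Int) × (Int × Int)) => d.insert k (pvG k.1)) _
  have h3 : (((pvPairs q).flatMap (fun p =>
        ((pvPairs q).filter (fun j => pvH j == pvG p)).map (fun j => (p, j)))).foldl
          (fun d k => d.insert k (pvG k.1))
          (PySem.Dict.empty : PySem.Dict ((Int × Int) × (Int × Int)) Int)).items
      = (PySem.Set.ofList ((pvPairs q).flatMap (fun p =>
          ((pvPairs q).filter (fun j => pvH j == pvG p)).map (fun j => (p, j))))).map
            (fun k => (k, pvG k.1)) :=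
    pv_items_foldl_insert_fun (fun k : (Int × Int) × (Int × Int) => pvG k.1) 0 _
  rw [h0, ← h1, ← h2, h3, pv_ofList_flat, List.map_map]
  rfl

-- ---- A-side characterisation ----
theorem pv_A_items (q : List Int) :
    symdif q = (pvKeys q).map (fun k => (k.1, k.2, pvG k.1)) := by
  have hsd : q.foldl (fun sd x =>
        q.foldl (fun (sd : PySem.Dict (Int × Int) Int × PySem.Dict (Int × Int) Int) y =>
          (sd.1.insert (x, y) (pyf x + pyf y), sd.2.insert (x, y) (pyf x - pyf y))) sd)
        (PySem.Dict.empty, PySem.Dict.empty)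
      = (pvSums q, pvDiffs q) := by
    have hin : (fun (sd : PySem.Dict (Int × Int) Int × PySem.Dict (Int × Int) Int) (x : Int) =>
          q.foldl (fun sd y =>
            (sd.1.insert (x, y) (pyf x + pyf y), sd.2.insert (x, y) (pyf x - pyf y))) sd)
        = fun sd x =>
            (q.foldl (fun d y => d.insert (x, y) (pyf x + pyf y)) sd.1,
             q.foldl (fun d y => d.insert (x, y) (pyf x - pyf y)) sd.2) := by
      funext sd x
      exact PySem.List.foldl_prod_mk
        (fun (d : PySem.Dict (Int × Int) Int) y => d.insert (x, y) (pyf x + pyf y))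
        (fun (d : PySem.Dict (Int × Int) Int) y => d.insert (x, y) (pyf x - pyf y)) q sd.1 sd.2
    rw [hin]
    refine (PySem.List.foldl_prod_mk
      (fun (d : PySem.Dict (Int × Int) Int) x =>
        q.foldl (fun d y => d.insert (x, y) (pyf x + pyf y)) d)
      (fun (d : PySem.Dict (Int × Int) Int) x =>
        q.foldl (fun d y => d.insert (x, y) (pyf x - pyf y)) d)
      q PySem.Dict.empty PySem.Dict.empty).trans ?_
    exact congrArg₂ Prod.mk
      (pv_foldl_flatMap_map q (fun _ => q) (fun x y => (x, y))
        (fun (d : PySem.Dict (Int × Int) Int) (p : Int × Int) => d.insert p (pvG p)) _).symm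
      (pv_foldl_flatMap_map q (fun _ => q) (fun x y => (x, y))
        (fun (d : PySem.Dict (Int × Int) Int) (p : Int × Int) => d.insert p (pvH p)) _).symm
  have e0 : symdif q
      = ((pvSums q).keys.foldl (fun d i =>
          (pvDiffs q).keys.foldl (fun d j =>
            if (pvSums q).getD i 0 = (pvDiffs q).getD j 0
            then d.insert (i, j) ((pvSums q).getD i 0) else d) d)
          (PySem.Dict.empty : PySem.Dict ((Int × Int) × (Int × Int)) Int)).items.map pvFlatten := by
    unfold symdif
    rw [hsd]
    rfl
  have hkS : (pvSums q).keys = pvU q := pv_keys_foldl_insert_fun pvG (pvPairs q)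
  have hkD : (pvDiffs q).keys = pvU q := pv_keys_foldl_insert_fun pvH (pvPairs q)
  have hcong : (pvU q).foldl (fun d i =>
        (pvU q).foldl (fun d j =>
          if (pvSums q).getD i 0 = (pvDiffs q).getD j 0
          then d.insert (i, j) ((pvSums q).getD i 0) else d) d)
        (PySem.Dict.empty : PySem.Dict ((Int × Int) × (Int × Int)) Int)
      = (pvU q).foldl (fun d i =>
          (pvU q).foldl (fun d j =>
            if pvG i = pvH j then d.insert (i, j) (pvG i) else d) d) PySem.Dict.empty := by
    refine PySem.List.foldl_congr_mem _ _ _ _ (fun acc i hi => ?_)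
    refine PySem.List.foldl_congr_mem _ _ _ _ (fun d j hj => ?_)
    rw [pv_getD_pvSums q i ((PySem.Set.mem_ofList _ _).1 hi),
      pv_getD_pvDiffs q j ((PySem.Set.mem_ofList _ _).1 hj)]
  have hif : (fun (d : PySem.Dict ((Int × Int) × (Int × Int)) Int) (i : Int × Int) =>
        (pvU q).foldl (fun d j => if pvG i = pvH j then d.insert (i, j) (pvG i) else d) d)
      = fun d i =>
        ((pvU q).filter (fun j => pvH j == pvG i)).foldl
          (fun d j => d.insert (i, j) (pvG i)) d := by
    funext d i
    rw [pv_foldl_ite_filter (fun j => pvG i = pvH j)]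
    congr 1
    refine List.filter_congr (fun j _ => ?_)
    by_cases h : pvG i = pvH j
    · simp [h]
    · have h' : pvH j ≠ pvG i := fun hh => h hh.symm
      simp [h, h']
  have h2 : ((pvU q).flatMap (fun i =>
        ((pvU q).filter (fun j => pvH j == pvG i)).map (fun j => (i, j)))).foldl
          (fun d k => d.insert k (pvG k.1))
          (PySem.Dict.empty : PySem.Dict ((Int × Int) × (Int × Int)) Int)
      = (pvU q).foldl (fun d i =>
          ((pvU q).filter (fun j => pvH j == pvG i)).foldl
            (fun d j => d.insert (i, j) (pvG i)) d) PySem.Dict.empty :=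
    pv_foldl_flatMap_map (pvU q)
      (fun i => (pvU q).filter (fun j => pvH j == pvG i)) (fun i j => (i, j))
      (fun (d : PySem.Dict ((Int × Int) × (Int × Int)) Int) (k : (Int × Int) × (Int × Int)) => d.insert k (pvG k.1)) _
  have hkeys : ((pvU q).flatMap (fun i =>
        ((pvU q).filter (fun j => pvH j == pvG i)).map (fun j => (i, j)))) = pvKeys q := rfl
  have h3 : ((pvKeys q).foldl (fun d k => d.insert k (pvG k.1))
        (PySem.Dict.empty : PySem.Dict ((Int × Int) × (Int × Int)) Int)).items
      = (PySem.Set.ofList (pvKeys q)).map (fun k => (k, pvG k.1)) :=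
    pv_items_foldl_insert_fun (fun k : (Int × Int) × (Int × Int) => pvG k.1) 0 _
  rw [e0, hkS, hkD, hcong, hif, ← h2, hkeys, h3,
    PySem.Set.ofList_eq_self_of_nodup _ (pv_nodup_pvKeys q), List.map_map]
  rfl

-- ===== VERDICT (by name: the statement is the Claim_ definition above) =====
theorem symdif_spec : Claim_equal_symdif := by
  intro q _
  unfold Spec_symdif
  rw [pv_A_items, pv_B_items]
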